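-- pv_equiv track=rewrite | github.com/User001Ge/- | election_engine.py | _leftmost_max_choice
-- ===== SOURCE A (Python) =====
-- from typing import Dict, List, Optional
--
-- def _leftmost_max_choice(scores: Dict[str, int], ordered_candidates: List[str]) -> str:
--     best_name = ordered_candidates[0]
--     best_score = scores[best_name]
--     for candidate in ordered_candidates[1:]:
--         score = scores[candidate]
--         if score > best_score:
--             best_name = candidate
--             best_score = score
--     return best_name
-- ===== SOURCE B (Python) =====
-- # B: two-pass — compute the maximum score first, then return the leftmost candidate achieving it.
-- def _leftmost_max_choice(scores, ordered_candidates):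
--     best = max(scores[c] for c in ordered_candidates)
--     for c in ordered_candidates:
--         if scores[c] == best:
--             return c
-- ===== Notes on version B (the rewrite author's own statement) =====
-- stated objective: simpler
-- what changed: Replaces the single running-best pass carrying (best_name, best_score) state with two stateless passes: a max() reduction over the scores followed by a scan for the first candidate achieving it.
import Mathlib
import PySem

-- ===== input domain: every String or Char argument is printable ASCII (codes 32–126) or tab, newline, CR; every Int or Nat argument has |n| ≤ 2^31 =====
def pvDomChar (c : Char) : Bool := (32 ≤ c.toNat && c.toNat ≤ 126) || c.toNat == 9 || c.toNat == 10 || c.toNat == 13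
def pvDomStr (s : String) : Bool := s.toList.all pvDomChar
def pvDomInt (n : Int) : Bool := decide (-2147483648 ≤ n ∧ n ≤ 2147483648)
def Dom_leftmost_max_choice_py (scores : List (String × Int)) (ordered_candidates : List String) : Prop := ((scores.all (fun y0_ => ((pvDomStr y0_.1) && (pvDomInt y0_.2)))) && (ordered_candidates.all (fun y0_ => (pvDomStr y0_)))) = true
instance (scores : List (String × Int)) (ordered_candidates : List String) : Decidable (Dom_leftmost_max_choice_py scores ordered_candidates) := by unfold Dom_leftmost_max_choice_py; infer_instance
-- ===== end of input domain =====

-- B replaces A's running-best pass (carrying best_name/best_score) by two stateless passes: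
-- a max() reduction over the scores, then a scan for the leftmost candidate achieving it (objective: simpler).

-- ===== PORT A =====
-- A's running-best loop; dict lookup ported as first-match association-list lookup (Pre_ guarantees the key exists).
def leftmost_max_choice_py (scores : List (String × Int)) (ordered_candidates : List String) : String :=
  match ordered_candidates with
  | [] => ""   -- IndexError in Python: excluded by Pre_
  | h :: t =>
    (t.foldl (fun (st : String × Int) c =>
        let score := (List.lookup c scores).getD 0
        if score > st.2 then (c, score) else st)
      (h, (List.lookup h scores).getD 0)).1

-- ===== PORT B =====
-- first pass of Source B: max(scores[c] for c in ordered_candidates) — a fold of max over the scores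
-- second pass of Source B: return the first candidate whose score equals the max
def lmcFindFirst (scores : List (String × Int)) (m : Int) : List String → String
  | [] => ""
  | c :: rest => if (List.lookup c scores).getD 0 = m then c else lmcFindFirst scores m rest

def leftmost_max_choice_py_alt (scores : List (String × Int)) (ordered_candidates : List String) : String :=
  match ordered_candidates with
  | [] => ""   -- ValueError from max() in Python: excluded by Pre_
  | h :: t =>
    let best := t.foldl (fun a c => max a ((List.lookup c scores).getD 0))
                  ((List.lookup h scores).getD 0)
    lmcFindFirst scores best (h :: t)

-- ===== PRECONDITION & SPEC =====
-- Pre_ excludes exactly the inputs where Python A raises: an empty candidate list (IndexError)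
-- or a candidate missing from scores (KeyError).
def Pre_leftmost_max_choice_py (scores : List (String × Int)) (ordered_candidates : List String) : Prop :=
  ordered_candidates ≠ [] ∧ ∀ c ∈ ordered_candidates, c ∈ scores.map Prod.fst
instance (scores : List (String × Int)) (ordered_candidates : List String) : Decidable (Pre_leftmost_max_choice_py scores ordered_candidates) := by unfold Pre_leftmost_max_choice_py; infer_instance

def pvWitness_leftmost_max_choice_py : (List (String × Int)) × List String :=
  ([("a", 1), ("b", 2), ("c", 2)], ["a", "b", "c"])

def Spec_leftmost_max_choice_py (scores : List (String × Int)) (ordered_candidates : List String) (out : String) : Prop := out = leftmost_max_choice_py_alt scores ordered_candidates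
instance (scores : List (String × Int)) (ordered_candidates : List String) (out : String) : Decidable (Spec_leftmost_max_choice_py scores ordered_candidates out) := by unfold Spec_leftmost_max_choice_py; infer_instance

-- ===== CLAIM (what is proved, stated in full; the proofs are below) =====
def Claim_equal_leftmost_max_choice_py : Prop := ∀ (scores : List (String × Int)) (ordered_candidates : List String), Dom_leftmost_max_choice_py scores ordered_candidates → Pre_leftmost_max_choice_py scores ordered_candidates → Spec_leftmost_max_choice_py scores ordered_candidates (leftmost_max_choice_py scores ordered_candidates)

-- ===== LEMMAS AND PROOFS =====

-- the starting accumulator is a lower bound of the max-fold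
theorem lmc_le_foldl_max (scores : List (String × Int)) (bs : Int) (t : List String) :
    bs ≤ t.foldl (fun a c => max a ((List.lookup c scores).getD 0)) bs := by
  have := (PySem.List.le_foldl_max (t.map (fun c => (List.lookup c scores).getD 0)) bs).1
  simpa [List.foldl_map] using this

-- the running-best fold returns the leftmost achiever of the max, provided the carried state is consistent
theorem lmc_key (scores : List (String × Int)) (t : List String) :
    ∀ (bn : String) (bs : Int), bs = (List.lookup bn scores).getD 0 →
      (t.foldl (fun (st : String × Int) c =>
          let score := (List.lookup c scores).getD 0
          if score > st.2 then (c, score) else st) (bn, bs)).1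
        = lmcFindFirst scores
            (t.foldl (fun a c => max a ((List.lookup c scores).getD 0)) bs) (bn :: t) := by
  induction t with
  | nil =>
    intro bn bs hbs
    simp [lmcFindFirst, hbs]
  | cons c t ih =>
    intro bn bs hbs
    by_cases h1 : (List.lookup c scores).getD 0 > bs
    · have hmax : max bs ((List.lookup c scores).getD 0) = (List.lookup c scores).getD 0 :=
        max_eq_right (le_of_lt h1)
      have hbn : (List.lookup bn scores).getD 0 ≠
          (t.foldl (fun a c => max a ((List.lookup c scores).getD 0))
            ((List.lookup c scores).getD 0)) := by
        have hle := lmc_le_foldl_max scores ((List.lookup c scores).getD 0) t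
        omega
      simp only [List.foldl_cons, if_pos h1, hmax]
      rw [ih c ((List.lookup c scores).getD 0) rfl]
      simp [lmcFindFirst, hbn]
    · have hmax : max bs ((List.lookup c scores).getD 0) = bs :=
        max_eq_left (le_of_not_gt h1)
      simp only [List.foldl_cons, if_neg h1, hmax]
      rw [ih bn bs hbs]
      -- both sides scan bn first; if bn misses the max, c misses it too (g c ≤ bs < M)
      by_cases h2 : (List.lookup bn scores).getD 0 =
          t.foldl (fun a c => max a ((List.lookup c scores).getD 0)) bs
      · simp [lmcFindFirst, h2]
      · have hc : (List.lookup c scores).getD 0 ≠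
            t.foldl (fun a c => max a ((List.lookup c scores).getD 0)) bs := by
          have hle := lmc_le_foldl_max scores bs t
          omega
        simp [lmcFindFirst, h2, hc]

-- ===== VERDICT (by name: the statement is the Claim_ definition above) =====
theorem leftmost_max_choice_py_spec : Claim_equal_leftmost_max_choice_py := by
  intro scores oc _ hpre
  unfold Spec_leftmost_max_choice_py
  match oc with
  | [] => exact absurd rfl hpre.1
  | h :: t =>
    simp only [leftmost_max_choice_py, leftmost_max_choice_py_alt]
    exact lmc_key scores t h _ rfl
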